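-- pv_equiv track=rewrite | github.com/Hsbtqemy/AGRAFES | src/multicorpus_engine/exporters/html_export.py | _highlight_to_html
-- ===== SOURCE A (Python) =====
-- def _highlight_to_html(text: str) -> str:
--     """Convert <<match>> markers to <span class='match'>match</span>.
--
--     The text is already HTML-escaped by the caller; the markers are not escaped.
--     """
--     # Because we escape first and then sub, the markers won't be escaped
--     result = ""
--     i = 0
--     while i < len(text):
--         open_pos = text.find("&lt;&lt;", i)
--         if open_pos == -1:
--             result += text[i:]
--             break
--         close_pos = text.find("&gt;&gt;", open_pos)
--         if close_pos == -1:
--             result += text[i:]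
--             break
--         result += text[i:open_pos]
--         inner = text[open_pos + 8: close_pos]
--         result += f"<span class='match'>{inner}</span>"
--         i = close_pos + 8
--     return result
-- ===== SOURCE B (Python) =====
-- def _highlight_to_html(text: str) -> str:
--     """Convert <<match>> markers to <span class='match'>match</span>.
--
--     Partition-based: repeatedly split the remaining text at the first
--     open marker and the first close marker after it, no index arithmetic.
--     """
--     result = ""
--     while True:
--         before, osep, rest = text.partition("&lt;&lt;")
--         if not osep:
--             return result + text
--         inner, csep, after = rest.partition("&gt;&gt;")
--         if not csep:
--             return result + text
--         result += before + f"<span class='match'>{inner}</span>"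
--         text = after
-- ===== Notes on version B (the rewrite author's own statement) =====
-- stated objective: simpler
-- what changed: Replaced the index-based while loop with find/slice position arithmetic by a string-consuming loop of str.partition calls that keeps no indices at all.
import Mathlib
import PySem

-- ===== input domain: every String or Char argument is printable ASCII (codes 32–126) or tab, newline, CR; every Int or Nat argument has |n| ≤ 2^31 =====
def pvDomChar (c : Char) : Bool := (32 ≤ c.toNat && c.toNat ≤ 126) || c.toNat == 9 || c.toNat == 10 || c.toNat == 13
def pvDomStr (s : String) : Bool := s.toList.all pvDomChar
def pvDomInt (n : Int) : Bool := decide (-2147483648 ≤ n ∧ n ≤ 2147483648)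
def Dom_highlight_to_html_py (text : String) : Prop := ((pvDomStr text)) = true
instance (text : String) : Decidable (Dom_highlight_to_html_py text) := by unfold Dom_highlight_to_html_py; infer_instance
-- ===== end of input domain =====

-- B replaces A's index-based find/slice while-loop by a string-consuming loop of
-- partition calls (simpler: no indices); return values proved equal on all inputs.

-- the marker / output literals, shared by both ports
def pvOpen : List Char := "&lt;&lt;".toList
def pvClose : List Char := "&gt;&gt;".toList
def pvSpanO : List Char := "<span class='match'>".toList
def pvSpanC : List Char := "</span>".toList

-- ===== PORT A =====
-- while-loop with state (result, i); fuel = len+1 only makes the loop total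
-- (each iteration advances i by at least 16)
def loopA (fuel : Nat) (text : List Char) (result : List Char) (i : Nat) : List Char :=
  match fuel with
  | 0 => result
  | fuel + 1 =>
    if i < text.length then
      let open_pos := PySem.Chars.findFrom text pvOpen (i : Int) none
      if open_pos = -1 then
        result ++ PySem.Chars.slice text (some (i : Int)) none
      else
        let close_pos := PySem.Chars.findFrom text pvClose open_pos none
        if close_pos = -1 then
          result ++ PySem.Chars.slice text (some (i : Int)) none
        else
          loopA fuel text
            (result ++ PySem.Chars.slice text (some (i : Int)) (some open_pos)
                    ++ pvSpanO
                    ++ PySem.Chars.slice text (some (open_pos + 8)) (some close_pos)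
                    ++ pvSpanC)
            (close_pos.toNat + 8)
    else result

def highlight_to_html_py (text : String) : String :=
  String.ofList (loopA (text.toList.length + 1) text.toList [] 0)

-- ===== PORT B =====
-- s.partition(sep) for nonempty sep (exact: (s[:i], sep, s[i+len(sep):]) at the first hit, else (s,'',''))
def partC (s sep : List Char) : List Char × List Char × List Char :=
  let idx := PySem.Chars.find s sep
  if idx = -1 then (s, [], [])
  else (PySem.Chars.slice s none (some idx), sep,
        PySem.Chars.slice s (some (idx + (sep.length : Int))) none)

-- the 'while True' loop of B; fuel only makes it total (text shrinks by ≥ 16 each pass)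
def altGo (fuel : Nat) (text : List Char) (result : List Char) : List Char :=
  match fuel with
  | 0 => result
  | fuel + 1 =>
    let p := partC text pvOpen
    if p.2.1 = [] then result ++ text
    else
      let q := partC p.2.2 pvClose
      if q.2.1 = [] then result ++ text
      else altGo fuel q.2.2 (result ++ p.1 ++ pvSpanO ++ q.1 ++ pvSpanC)

def highlight_to_html_py_alt (text : String) : String :=
  String.ofList (altGo (text.toList.length + 1) text.toList [])

-- ===== PRECONDITION & SPEC =====
def Spec_highlight_to_html_py (text : String) (out : String) : Prop := out = highlight_to_html_py_alt text
instance (text : String) (out : String) : Decidable (Spec_highlight_to_html_py text out) := by unfold Spec_highlight_to_html_py; infer_instance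

-- ===== CLAIM (what is proved, stated in full; the proofs are below) =====
def Claim_equal_highlight_to_html_py : Prop := ∀ (text : String), Dom_highlight_to_html_py text → Spec_highlight_to_html_py text (highlight_to_html_py text)

-- ===== LEMMAS AND PROOFS =====

-- no close marker can start inside an open marker
lemma pv_no_close_in_open (p : Nat) (hp : p < 8) (s : List Char) :
    ¬ pvClose <+: (pvOpen.drop p ++ s) := by
  interval_cases p <;>
    simp [pvOpen, pvClose, List.cons_prefix_cons]

lemma pv_infix_iff (sub s : List Char) :
    sub <:+: s ↔ ∃ j, sub <+: s.drop j := by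
  rw [← PySem.Chars.isIn_iff_infix, ← PySem.Chars.exists_prefix_drop_iff_isIn]

-- the first close marker in pvOpen ++ s is 8 + the first one in s
lemma pv_find_close_append (s : List Char) :
    PySem.Chars.find (pvOpen ++ s) pvClose =
      if PySem.Chars.find s pvClose = -1 then -1 else 8 + PySem.Chars.find s pvClose := by
  have hdrop : ∀ q : Nat, 8 ≤ q → (pvOpen ++ s).drop q = s.drop (q - 8) := by
    intro q hq
    have h1 : (pvOpen ++ s).drop q = ((pvOpen ++ s).drop 8).drop (q - 8) := by
      rw [List.drop_drop]; congr 1; omega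
    rw [h1, List.drop_left' (by decide : pvOpen.length = 8)]
  have hdrop' : ∀ q : Nat, q < 8 → (pvOpen ++ s).drop q = pvOpen.drop q ++ s := by
    intro q hq
    exact List.drop_append_of_le_length (by simp [pvOpen]; omega)
  by_cases h : PySem.Chars.find s pvClose = -1
  · rw [h, if_pos rfl]
    rw [PySem.Chars.find_eq_neg_one_iff, pv_infix_iff]
    rintro ⟨q, hq⟩
    by_cases hq8 : q < 8
    · exact pv_no_close_in_open q hq8 s (by rwa [hdrop' q hq8] at hq)
    · apply (PySem.Chars.find_eq_neg_one_iff s pvClose).mp h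
      rw [pv_infix_iff]
      exact ⟨q - 8, by rwa [hdrop q (by omega)] at hq⟩
  · rw [if_neg h]
    have hge : 0 ≤ PySem.Chars.find s pvClose := by
      have := PySem.Chars.neg_one_le_find s pvClose; omega
    obtain ⟨hf1, hf2⟩ := PySem.Chars.find_spec (s := s) (sub := pvClose) hge
    set f := (PySem.Chars.find s pvClose).toNat with hfdef
    have hcand : pvClose <+: (pvOpen ++ s).drop (8 + f) := by
      rw [hdrop (8 + f) (by omega)]; simpa using hf1
    have hge' : 0 ≤ PySem.Chars.find (pvOpen ++ s) pvClose := by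
      rw [PySem.Chars.find_nonneg_iff, pv_infix_iff]
      exact ⟨8 + f, hcand⟩
    obtain ⟨hg1, hg2⟩ := PySem.Chars.find_spec (s := pvOpen ++ s) (sub := pvClose) hge'
    set g := (PySem.Chars.find (pvOpen ++ s) pvClose).toNat with hgdef
    have hgle : g ≤ 8 + f := by
      by_contra hlt
      exact hg2 (8 + f) (by omega) hcand
    have hg8 : 8 ≤ g := by
      by_contra hlt
      exact pv_no_close_in_open g (by omega) s (by rwa [hdrop' g (by omega)] at hg1)
    have hfg : f ≤ g - 8 := by
      by_contra hlt
      exact hf2 (g - 8) (by omega) (by rwa [hdrop g hg8] at hg1)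
    have hgf : g = 8 + f := by omega
    have h1 : PySem.Chars.find (pvOpen ++ s) pvClose = ((8 + f : Nat) : Int) := by
      rw [← hgf, hgdef, Int.toNat_of_nonneg hge']
    have h2 : PySem.Chars.find s pvClose = (f : Int) := by
      rw [hfdef, Int.toNat_of_nonneg hge]
    rw [h1, h2]; push_cast; ring

-- one occurrence of pvOpen splits the text
lemma pv_prefix_split {t : List Char} {k : Nat} (h : pvOpen <+: t.drop k) :
    t.drop k = pvOpen ++ t.drop (k + 8) ∧ k + 8 ≤ t.length := by
  obtain ⟨u, hu⟩ := h
  have hlen : (t.drop k).length = t.length - k := List.length_drop ..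
  have hk8 : k + 8 ≤ t.length := by
    rw [← hu, List.length_append, (by decide : pvOpen.length = 8)] at hlen
    have := Nat.sub_le t.length k
    omega
  have hdu : t.drop (k + 8) = u := by
    have h1 : t.drop (k + 8) = (t.drop k).drop 8 := by rw [List.drop_drop]
    rw [h1, ← hu, List.drop_left' (by decide : pvOpen.length = 8)]
  exact ⟨by rw [hdu, hu], hk8⟩

lemma pv_prefix_split_close {t : List Char} {k : Nat} (h : pvClose <+: t.drop k) :
    t.drop k = pvClose ++ t.drop (k + 8) ∧ k + 8 ≤ t.length := by
  obtain ⟨u, hu⟩ := h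
  have hlen : (t.drop k).length = t.length - k := List.length_drop ..
  have hk8 : k + 8 ≤ t.length := by
    rw [← hu, List.length_append, (by decide : pvClose.length = 8)] at hlen
    have := Nat.sub_le t.length k
    omega
  have hdu : t.drop (k + 8) = u := by
    have h1 : t.drop (k + 8) = (t.drop k).drop 8 := by rw [List.drop_drop]
    rw [h1, ← hu, List.drop_left' (by decide : pvClose.length = 8)]
  exact ⟨by rw [hdu, hu], hk8⟩

-- the main loop correspondence: loopA's (result, i) matches altGo's (result, text.drop i)
lemma pv_main (n : Nat) : ∀ (text result : List Char) (i fuelA fuelB : Nat),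
    i ≤ text.length → text.length - i ≤ n →
    text.length - i < fuelA → text.length - i < fuelB →
    loopA fuelA text result i = altGo fuelB (text.drop i) result := by
  induction n using Nat.strong_induction_on with
  | _ n IH =>
    intro text result i fuelA fuelB hi hn hfA hfB
    obtain ⟨fA, rfl⟩ : ∃ fA, fuelA = fA + 1 := ⟨fuelA - 1, by omega⟩
    obtain ⟨fB, rfl⟩ : ∃ fB, fuelB = fB + 1 := ⟨fuelB - 1, by omega⟩
    by_cases hlen : i < text.length
    · rw [loopA, altGo, if_pos hlen]
      rw [PySem.Chars.findFrom_natCast text pvOpen i hi]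
      by_cases hO : PySem.Chars.find (text.drop i) pvOpen = -1
      · rw [hO]
        simp [partC, hO, PySem.List.slice_from_natCast]
      · have hOge : 0 ≤ PySem.Chars.find (text.drop i) pvOpen := by
          have := PySem.Chars.neg_one_le_find (text.drop i) pvOpen; omega
        set j := (PySem.Chars.find (text.drop i) pvOpen).toNat with hjdef
        have hjval : PySem.Chars.find (text.drop i) pvOpen = (j : Int) := by
          rw [hjdef, Int.toNat_of_nonneg hOge]
        have hOpre : pvOpen <+: text.drop (i + j) := by
          have h := (PySem.Chars.find_spec (s := text.drop i) (sub := pvOpen) hOge).1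
          rwa [← hjdef, List.drop_drop] at h
        obtain ⟨hsplit, hij8⟩ := pv_prefix_split hOpre
        have hjne : ¬ ((j : Int) = -1) := by omega
        have hcast : (i : Int) + (j : Int) = ((i + j : Nat) : Int) := by push_cast; ring
        have hfind2 : PySem.Chars.find (text.drop (i + j)) pvClose =
            if PySem.Chars.find (text.drop (i + j + 8)) pvClose = -1 then -1
            else 8 + PySem.Chars.find (text.drop (i + j + 8)) pvClose := by
          rw [hsplit]; exact pv_find_close_append _
        have hslA : PySem.Chars.slice (text.drop i) none (some (j : Int))
            = (text.drop i).take j := by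
          simp [PySem.List.slice_to_natCast]
        have hslB : PySem.Chars.slice (text.drop i) (some ((j : Int) + (pvOpen.length : Int))) none
            = text.drop (i + j + 8) := by
          have h8 : ((j : Int) + (pvOpen.length : Int)) = ((j + 8 : Nat) : Int) := by
            have : pvOpen.length = 8 := by decide
            rw [this]; push_cast; ring
          rw [h8, PySem.Chars.slice_eq_listSlice, PySem.List.slice_from_natCast,
            List.drop_drop, ← Nat.add_assoc]
        have hpart1 : partC (text.drop i) pvOpen
            = ((text.drop i).take j, pvOpen, text.drop (i + j + 8)) := by
          simp only [partC, hjval, if_neg hjne, hslA, hslB]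
        simp only [hjval, if_neg hjne, hcast,
          PySem.Chars.findFrom_natCast text pvClose (i + j) (by omega), hfind2, hpart1]
        rw [if_neg (by decide : ¬ (pvOpen = ([] : List Char)))]
        by_cases hC : PySem.Chars.find (text.drop (i + j + 8)) pvClose = -1
        · rw [hC]
          simp [partC, hC, PySem.List.slice_from_natCast]
        · have hCge : 0 ≤ PySem.Chars.find (text.drop (i + j + 8)) pvClose := by
            have := PySem.Chars.neg_one_le_find (text.drop (i + j + 8)) pvClose; omega
          set f := (PySem.Chars.find (text.drop (i + j + 8)) pvClose).toNat with hfdef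
          have hfval : PySem.Chars.find (text.drop (i + j + 8)) pvClose = (f : Int) := by
            rw [hfdef, Int.toNat_of_nonneg hCge]
          have hCpre : pvClose <+: text.drop (i + j + 8 + f) := by
            have h := (PySem.Chars.find_spec (s := text.drop (i + j + 8)) (sub := pvClose) hCge).1
            rwa [← hfdef, List.drop_drop] at h
          obtain ⟨hsplitC, hclose8⟩ := pv_prefix_split_close hCpre
          have hfne : ¬ ((f : Int) = -1) := by omega
          have hclosene : ¬ (((i + j : Nat) : Int) + (8 + (f : Int)) = -1) := by
            push_cast; omega
          have hslC : PySem.Chars.slice (text.drop (i + j + 8)) none (some (f : Int))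
              = (text.drop (i + j + 8)).take f := by
            simp [PySem.List.slice_to_natCast]
          have hslD : PySem.Chars.slice (text.drop (i + j + 8))
                (some ((f : Int) + (pvClose.length : Int))) none
              = text.drop (i + j + 8 + f + 8) := by
            have h8 : ((f : Int) + (pvClose.length : Int)) = ((f + 8 : Nat) : Int) := by
              have : pvClose.length = 8 := by decide
              rw [this]; push_cast; ring
            rw [h8, PySem.Chars.slice_eq_listSlice, PySem.List.slice_from_natCast,
              List.drop_drop, ← Nat.add_assoc]
          have hpart2 : partC (text.drop (i + j + 8)) pvClose
              = ((text.drop (i + j + 8)).take f, pvClose, text.drop (i + j + 8 + f + 8)) := by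
            simp only [partC, hfval, if_neg hfne, hslC, hslD]
          have htoNat : (((i + j : Nat) : Int) + (8 + (f : Int))).toNat + 8
              = i + j + 8 + f + 8 := by omega
          have hbefore : PySem.Chars.slice text (some (i : Int)) (some ((i + j : Nat) : Int))
              = (text.drop i).take j := by
            simp only [PySem.Chars.slice_eq_listSlice, PySem.List.slice_natCast]
            congr 1; omega
          have hinner : PySem.Chars.slice text (some (((i + j : Nat) : Int) + 8))
                (some (((i + j : Nat) : Int) + (8 + (f : Int))))
              = (text.drop (i + j + 8)).take f := by
            have e1 : ((i + j : Nat) : Int) + 8 = ((i + j + 8 : Nat) : Int) := by push_cast; ring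
            have e2 : ((i + j : Nat) : Int) + (8 + (f : Int)) = ((i + j + 8 + f : Nat) : Int) := by
              push_cast; ring
            rw [e1, e2]
            simp only [PySem.Chars.slice_eq_listSlice, PySem.List.slice_natCast]
            congr 1; omega
          have hijcne : ¬ (((i + j : Nat) : Int) = -1) := by omega
          have h8fne : ¬ ((8 : Int) + (f : Int) = -1) := by omega
          simp only [hfval, if_neg hfne, if_neg h8fne, if_neg hijcne, if_neg hclosene, hpart2,
            if_neg (by decide : ¬ (pvClose = ([] : List Char))), htoNat, hbefore, hinner]
          exact IH (text.length - (i + j + 8 + f + 8)) (by omega) text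
            (result ++ (text.drop i).take j ++ pvSpanO ++ (text.drop (i + j + 8)).take f ++ pvSpanC)
            (i + j + 8 + f + 8) fA fB (by omega) (by omega) (by omega) (by omega)
    · have hieq : i = text.length := by omega
      rw [loopA, if_neg hlen, altGo, hieq, List.drop_length]
      have hOnil : PySem.Chars.find ([] : List Char) pvOpen = -1 := by decide
      simp [partC, hOnil]

-- ===== VERDICT (by name: the statement is the Claim_ definition above) =====
theorem highlight_to_html_py_spec : Claim_equal_highlight_to_html_py := by
  intro text _
  unfold Spec_highlight_to_html_py highlight_to_html_py highlight_to_html_py_alt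
  have := pv_main text.toList.length text.toList [] 0 (text.toList.length + 1)
    (text.toList.length + 1) (by omega) (by omega) (by omega) (by omega)
  rw [this, List.drop_zero]
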